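-- pv_equiv track=rewrite | github.com/sykwon/sigmod2025like | src/LPLM/compute_ground_truth_by_alg.py | canonicalize_like_query
-- ===== SOURCE A (Python) =====
-- def parse_like_query(qry, split_beta=False):
--     parsed = []
--     curr = qry[0]
--     is_wild = curr == "_" or curr == "%"
--     for ch in qry[1:]:
--         if ch == "_" or ch == "%":
--             if is_wild:
--                 curr += ch
--             else:
--                 parsed.append(curr)
--                 is_wild = True
--                 curr = ch
--         else:
--             if is_wild:
--                 parsed.append(curr)
--                 is_wild = False
--                 curr = ch
--             else:
--                 curr += ch
--     parsed.append(curr)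
--     if split_beta:
--         parsed_bak = parsed
--         parsed = []
--         for token in parsed_bak:
--             if "%" in token or "_" in token:
--                 parsed.append(token)
--             else:
--                 parsed.extend(list(token))
--     return parsed
--
-- def canonicalize_like_query(qry, is_last_flip=False):
--     parsed = parse_like_query(qry)
--
--     out_tokens = []
--     n_alpha = 0
--     for token in parsed:
--         if "_" in token or "%" in token:
--             n_alpha += 1
--             if "%" in token:
--                 new_token = "%"
--             else:
--                 new_token = ""
--             new_token += "_" * token.count("_")
--             out_tokens.append(new_token)
--         else:
--             out_tokens.append(token)
--     if is_last_flip and n_alpha > 1 and "%" in out_tokens[-1]: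
--         out_tokens[-1] = "_" * (len(out_tokens[-1]) - 1) + "%"
--     return "".join(out_tokens)
-- ===== SOURCE B (Python) =====
-- def canonicalize_like_query(qry, is_last_flip=False):
--     # single index-based pass over maximal same-kind runs; no intermediate parse list
--     out = []
--     n_alpha = 0
--     i, n = 0, len(qry)
--     while i < n:
--         wild = qry[i] in "_%"
--         j = i + 1
--         while j < n and (qry[j] in "_%") == wild:
--             j += 1
--         run = qry[i:j]
--         if wild:
--             n_alpha += 1
--             out.append(("%" if "%" in run else "") + "_" * run.count("_"))
--         else:
--             out.append(run)
--         i = j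
--     if is_last_flip and n_alpha > 1 and out and "%" in out[-1]:
--         out[-1] = "_" * (len(out[-1]) - 1) + "%"
--     return "".join(out)
-- ===== Notes on version B (the rewrite author's own statement) =====
-- stated objective: simpler
-- what changed: B replaces A's two-phase pipeline (parse_like_query building a token list via a char-by-char state machine, then a second loop re-scanning each token) with a single index-based scan that finds each maximal same-kind run and emits its canonical token directly.
import Mathlib
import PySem

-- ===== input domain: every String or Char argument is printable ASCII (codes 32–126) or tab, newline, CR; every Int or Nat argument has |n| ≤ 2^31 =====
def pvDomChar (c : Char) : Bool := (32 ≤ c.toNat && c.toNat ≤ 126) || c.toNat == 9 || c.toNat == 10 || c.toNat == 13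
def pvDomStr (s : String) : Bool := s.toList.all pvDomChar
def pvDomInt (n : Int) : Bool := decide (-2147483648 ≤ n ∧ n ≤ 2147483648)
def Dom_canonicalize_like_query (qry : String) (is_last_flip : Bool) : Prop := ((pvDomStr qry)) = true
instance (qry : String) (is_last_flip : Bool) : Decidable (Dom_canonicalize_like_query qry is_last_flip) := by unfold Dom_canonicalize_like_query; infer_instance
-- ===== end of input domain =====

-- B fuses A's parse-then-canonicalize pipeline into one run-at-a-time scan (objective: simpler); same return value wherever A returns.

-- shared test: Python's `ch in "_%"` / `ch == "_" or ch == "%"`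
def pvW (c : Char) : Bool := c == '_' || c == '%'

-- ===== PORT A =====
-- the for-loop of parse_like_query over qry[1:] with state (parsed, is_wild, curr)
def pvParseLoop : List Char → List (List Char) → Bool → List Char → List (List Char)
  | [], parsed, _, curr => parsed ++ [curr]
  | ch :: rest, parsed, is_wild, curr =>
    if pvW ch then
      if is_wild then pvParseLoop rest parsed is_wild (curr ++ [ch])
      else pvParseLoop rest (parsed ++ [curr]) true [ch]
    else
      if is_wild then pvParseLoop rest (parsed ++ [curr]) false [ch]
      else pvParseLoop rest parsed is_wild (curr ++ [ch])

-- one iteration of canonicalize_like_query's token loop, state (out_tokens, n_alpha)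
def pvCanonStep (acc : List (List Char) × Nat) (tok : List Char) : List (List Char) × Nat :=
  if tok.contains '_' || tok.contains '%' then
    (acc.1 ++ [(if tok.contains '%' then ['%'] else []) ++ List.replicate (tok.count '_') '_'], acc.2 + 1)
  else (acc.1 ++ [tok], acc.2)

def canonicalize_like_query (qry : String) (is_last_flip : Bool) : String :=
  match qry.toList with
  | [] => ""   -- Python raises IndexError here (qry[0]); excluded by Pre_
  | c :: cs =>
    let parsed := pvParseLoop cs [] (pvW c) [c]
    let r := parsed.foldl pvCanonStep ([], 0)
    let out :=
      match r.1.getLast? with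
      | some last =>
        if is_last_flip && decide (r.2 > 1) && last.contains '%' then
          r.1.dropLast ++ [List.replicate (last.length - 1) '_' ++ ['%']]
        else r.1
      | none => r.1
    String.ofList out.flatten

-- ===== PORT B =====
-- B's outer while loop: consume one maximal same-kind run per step, emit its token directly
def pvAltRun : List Char → List (List Char) × Nat
  | [] => ([], 0)
  | c :: cs =>
    let w := pvW c
    let run := c :: cs.takeWhile (fun x => pvW x == w)
    let rest := cs.dropWhile (fun x => pvW x == w)
    let r := pvAltRun rest
    if w then
      (((if run.contains '%' then ['%'] else []) ++ List.replicate (run.count '_') '_') :: r.1, r.2 + 1)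
    else (run :: r.1, r.2)
  termination_by l => l.length
  decreasing_by
    simpa using Nat.lt_succ_of_le (List.length_dropWhile_le _ _)

def canonicalize_like_query_alt (qry : String) (is_last_flip : Bool) : String :=
  let r := pvAltRun qry.toList
  let out :=
    match r.1.getLast? with
    | some last =>
      if is_last_flip && decide (r.2 > 1) && last.contains '%' then
        r.1.dropLast ++ [List.replicate (last.length - 1) '_' ++ ['%']]
      else r.1
    | none => r.1
  String.ofList out.flatten

-- ===== PRECONDITION & SPEC =====
-- Pre_ excludes only the empty string, on which Python A raises IndexError (qry[0]).
def Pre_canonicalize_like_query (qry : String) (is_last_flip : Bool) : Prop := qry ≠ ""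
instance (qry : String) (is_last_flip : Bool) : Decidable (Pre_canonicalize_like_query qry is_last_flip) := by unfold Pre_canonicalize_like_query; infer_instance

def pvWitness_canonicalize_like_query : String × Bool := ("ab%_c", true)

def Spec_canonicalize_like_query (qry : String) (is_last_flip : Bool) (out : String) : Prop := out = canonicalize_like_query_alt qry is_last_flip
instance (qry : String) (is_last_flip : Bool) (out : String) : Decidable (Spec_canonicalize_like_query qry is_last_flip out) := by unfold Spec_canonicalize_like_query; infer_instance

-- ===== CLAIM (what is proved, stated in full; the proofs are below) =====
def Claim_equal_canonicalize_like_query : Prop := ∀ (qry : String) (is_last_flip : Bool), Dom_canonicalize_like_query qry is_last_flip → Pre_canonicalize_like_query qry is_last_flip → Spec_canonicalize_like_query qry is_last_flip (canonicalize_like_query qry is_last_flip)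


-- ===== LEMMAS AND PROOFS =====

-- the run decomposition both programs compute, as a continuation of an open run
def runsCont (curr : List Char) (w : Bool) : List Char → List (List Char)
  | [] => [curr]
  | ch :: rest => if pvW ch = w then runsCont (curr ++ [ch]) w rest
                  else curr :: runsCont [ch] (pvW ch) rest

-- A's per-token canonicalization and its guard
def pA (t : List Char) : Bool := t.contains '_' || t.contains '%'
def gA (t : List Char) : List Char :=
  if pA t then (if t.contains '%' then ['%'] else []) ++ List.replicate (t.count '_') '_' else t

theorem pvParseLoop_eq (rest : List Char) :
    ∀ (parsed : List (List Char)) (w : Bool) (curr : List Char),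
      pvParseLoop rest parsed w curr = parsed ++ runsCont curr w rest := by
  induction rest with
  | nil => intro parsed w curr; simp [pvParseLoop, runsCont]
  | cons ch rest ih =>
    intro parsed w curr
    by_cases h : pvW ch = w
    · cases hw : pvW ch <;> simp [pvParseLoop, runsCont, hw, h ▸ hw, ← h, ih]
    · cases hw : pvW ch <;>
        simp_all [pvParseLoop, runsCont, hw, ih] <;> simp [ih, List.append_assoc]

theorem foldl_canonStep (ts : List (List Char)) :
    ∀ (acc : List (List Char)) (n : Nat),
      ts.foldl pvCanonStep (acc, n) = (acc ++ ts.map gA, n + ts.countP pA) := by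
  induction ts with
  | nil => intro acc n; simp
  | cons t ts ih =>
    intro acc n
    by_cases h : '_' ∈ t ∨ '%' ∈ t
    · simp [List.foldl_cons, pvCanonStep, gA, pA, List.countP_cons, h, ih]
      omega
    · simp [List.foldl_cons, pvCanonStep, gA, pA, List.countP_cons, h, ih]

theorem hom_pA {curr : List Char} {w : Bool} (hne : curr ≠ [])
    (hhom : ∀ x ∈ curr, pvW x = w) : pA curr = w := by
  cases curr with
  | nil => exact absurd rfl hne
  | cons c cs =>
    have hc := hhom c (by simp)
    cases w
    · -- no element is '_' or '%'
      simp only [pA, Bool.or_eq_false_iff]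
      constructor <;>
      · simp only [List.contains_eq_mem, decide_eq_false_iff_not]
        intro hmem
        have := hhom _ hmem
        simp [pvW] at this
    · -- head c is '_' or '%'
      have : c = '_' ∨ c = '%' := by
        simpa [pvW] using hc
      rcases this with h | h <;> simp [pA, h, List.contains_eq_mem]

theorem takeWhile_all_break {p : Char → Bool} (l : List Char) (y : Char) (r : List Char)
    (hl : ∀ x ∈ l, p x = true) (hy : p y = false) :
    (l ++ y :: r).takeWhile p = l ∧ (l ++ y :: r).dropWhile p = y :: r := by
  induction l with
  | nil => simp [List.takeWhile, List.dropWhile, hy]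
  | cons a l ih =>
    have ha := hl a (by simp)
    have := ih (fun x hx => hl x (by simp [hx]))
    simp [List.takeWhile, List.dropWhile, ha, this]

theorem pvAltRun_eq (rest : List Char) :
    ∀ (curr : List Char) (w : Bool), curr ≠ [] → (∀ x ∈ curr, pvW x = w) →
      pvAltRun (curr ++ rest) =
        ((runsCont curr w rest).map gA, (runsCont curr w rest).countP pA) := by
  induction rest with
  | nil =>
    intro curr w hne hhom
    cases curr with
    | nil => exact absurd rfl hne
    | cons c cs =>
      have hc : pvW c = w := hhom c (by simp)
      have htw : cs.takeWhile (fun x => pvW x == pvW c) = cs := by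
        rw [List.takeWhile_eq_self_iff]
        intro x hx; simp [hhom x (by simp [hx]), hc]
      have hdw : cs.dropWhile (fun x => pvW x == pvW c) = [] := by
        rw [List.dropWhile_eq_nil_iff]
        intro x hx; simp [hhom x (by simp [hx]), hc]
      have hpa : pA (c :: cs) = w := hom_pA hne hhom
      rw [List.append_nil, pvAltRun]
      simp only [htw, hdw]
      cases w
      · simp [runsCont, gA, List.countP_cons, hpa, hc, pvAltRun]
      · simp [runsCont, gA, List.countP_cons, hpa, hc, pvAltRun]
  | cons ch rest ih =>
    intro curr w hne hhom
    by_cases h : pvW ch = w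
    · have : curr ++ ch :: rest = (curr ++ [ch]) ++ rest := by simp
      rw [this, ih (curr ++ [ch]) w (by simp) (by
        intro x hx
        rcases List.mem_append.1 hx with hx | hx
        · exact hhom x hx
        · simp at hx; simpa [hx] using h)]
      simp [runsCont, h]
    · cases curr with
      | nil => exact absurd rfl hne
      | cons c cs =>
        have hc : pvW c = w := hhom c (by simp)
        have hcs : ∀ x ∈ cs, (fun x => pvW x == pvW c) x = true := by
          intro x hx; simp [hhom x (by simp [hx]), hc]
        have hch : (fun x => pvW x == pvW c) ch = false := by
          simp [hc]; exact h
        have hsplit := takeWhile_all_break (p := fun x => pvW x == pvW c) cs ch rest hcs hch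
        have hpa : pA (c :: cs) = w := hom_pA hne hhom
        have hrest := ih [ch] (pvW ch) (by simp) (by simp)
        rw [show (c :: cs) ++ ch :: rest = c :: (cs ++ ch :: rest) by simp, pvAltRun]
        simp only [hsplit.1, hsplit.2]
        rw [List.singleton_append] at hrest
        rw [hrest]
        cases w
        · simp [runsCont, h, gA, List.countP_cons, hpa, hc]
        · simp [runsCont, h, gA, List.countP_cons, hpa, hc]

theorem main_eq (qry : String) (is_last_flip : Bool) (h : qry ≠ "") :
    canonicalize_like_query qry is_last_flip = canonicalize_like_query_alt qry is_last_flip := by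
  unfold canonicalize_like_query canonicalize_like_query_alt
  cases hq : qry.toList with
  | nil =>
    exact absurd (String.toList_eq_nil_iff.mp hq) h
  | cons c cs =>
    have hA := pvParseLoop_eq cs [] (pvW c) [c]
    have hF := foldl_canonStep (runsCont [c] (pvW c) cs) [] 0
    have hB := pvAltRun_eq cs [c] (pvW c) (by simp) (by simp)
    simp only [Nat.zero_add] at hF
    simp only [hA, List.nil_append] at *
    rw [hF, show c :: cs = [c] ++ cs by simp, hB]

-- ===== VERDICT (by name: the statement is the Claim_ definition above) =====
theorem canonicalize_like_query_spec : Claim_equal_canonicalize_like_query := by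
  intro qry is_last_flip _ hpre
  exact (main_eq qry is_last_flip hpre).symm ▸ rfl
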